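-- pv_equiv track=rewrite | github.com/aykutssert/astromind-backend | app.py | get_dignity
-- ===== SOURCE A (Python) =====
-- from typing import Optional
--
-- DIGNITY_TABLE = {
--     "Sun":     {"Domicile": [4],      "Exaltation": [0],  "Detriment": [10],    "Fall": [6]},
--     "Moon":    {"Domicile": [3],      "Exaltation": [1],  "Detriment": [9],     "Fall": [7]},
--     "Mercury": {"Domicile": [2, 5],   "Exaltation": [5],  "Detriment": [8, 11], "Fall": [11]},
--     "Venus":   {"Domicile": [1, 6],   "Exaltation": [11], "Detriment": [7, 0],  "Fall": [5]},
--     "Mars":    {"Domicile": [0, 7],   "Exaltation": [9],  "Detriment": [6, 1],  "Fall": [3]},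
--     "Jupiter": {"Domicile": [8, 11],  "Exaltation": [3],  "Detriment": [2, 5],  "Fall": [9]},
--     "Saturn":  {"Domicile": [9, 10],  "Exaltation": [6],  "Detriment": [3, 4],  "Fall": [0]},
--     "Uranus":  {"Domicile": [10],     "Exaltation": [7],  "Detriment": [4],     "Fall": [1]},
--     "Neptune": {"Domicile": [11],     "Exaltation": [3],  "Detriment": [5],     "Fall": [9]},
--     "Pluto":   {"Domicile": [7],      "Exaltation": [0],  "Detriment": [1],     "Fall": [6]},
-- }
--
-- def get_dignity(planet_name: str, sign_index: int) -> Optional[str]: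
--     """Return dignity string or None."""
--     table = DIGNITY_TABLE.get(planet_name)
--     if not table:
--         return None
--     for dignity, signs in table.items():
--         if sign_index in signs:
--             return dignity
--     return None
-- ===== SOURCE B (Python) =====
-- from typing import Optional
--
-- # Flat hand-inverted lookup table (planet, sign) -> dignity; for signs listed
-- # under several dignities the FIRST one in the original table's order is kept
-- # (e.g. Mercury sign 5 -> Domicile, not Exaltation).
-- INVERTED = {
--     ('Sun', 4): 'Domicile',
--     ('Sun', 0): 'Exaltation',
--     ('Sun', 10): 'Detriment',
--     ('Sun', 6): 'Fall',
--     ('Moon', 3): 'Domicile',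
--     ('Moon', 1): 'Exaltation',
--     ('Moon', 9): 'Detriment',
--     ('Moon', 7): 'Fall',
--     ('Mercury', 2): 'Domicile',
--     ('Mercury', 5): 'Domicile',
--     ('Mercury', 8): 'Detriment',
--     ('Mercury', 11): 'Detriment',
--     ('Venus', 1): 'Domicile',
--     ('Venus', 6): 'Domicile',
--     ('Venus', 11): 'Exaltation',
--     ('Venus', 7): 'Detriment',
--     ('Venus', 0): 'Detriment',
--     ('Venus', 5): 'Fall',
--     ('Mars', 0): 'Domicile',
--     ('Mars', 7): 'Domicile',
--     ('Mars', 9): 'Exaltation',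
--     ('Mars', 6): 'Detriment',
--     ('Mars', 1): 'Detriment',
--     ('Mars', 3): 'Fall',
--     ('Jupiter', 8): 'Domicile',
--     ('Jupiter', 11): 'Domicile',
--     ('Jupiter', 3): 'Exaltation',
--     ('Jupiter', 2): 'Detriment',
--     ('Jupiter', 5): 'Detriment',
--     ('Jupiter', 9): 'Fall',
--     ('Saturn', 9): 'Domicile',
--     ('Saturn', 10): 'Domicile',
--     ('Saturn', 6): 'Exaltation',
--     ('Saturn', 3): 'Detriment',
--     ('Saturn', 4): 'Detriment',
--     ('Saturn', 0): 'Fall',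
--     ('Uranus', 10): 'Domicile',
--     ('Uranus', 7): 'Exaltation',
--     ('Uranus', 4): 'Detriment',
--     ('Uranus', 1): 'Fall',
--     ('Neptune', 11): 'Domicile',
--     ('Neptune', 3): 'Exaltation',
--     ('Neptune', 5): 'Detriment',
--     ('Neptune', 9): 'Fall',
--     ('Pluto', 7): 'Domicile',
--     ('Pluto', 0): 'Exaltation',
--     ('Pluto', 1): 'Detriment',
--     ('Pluto', 6): 'Fall',
-- }
--
-- def get_dignity(planet_name: str, sign_index: int) -> Optional[str]:
--     """Return dignity string or None."""
--     return INVERTED.get((planet_name, sign_index))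
-- ===== Notes on version B (the rewrite author's own statement) =====
-- stated objective: simpler
-- what changed: Replaces the nested dignity table and the per-call scan over the planet's four dignity lists by a flat hand-inverted dict (planet, sign) -> dignity (first dignity in the original order kept on overlap), so the function is a single dict lookup with no loop.
import Mathlib
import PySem

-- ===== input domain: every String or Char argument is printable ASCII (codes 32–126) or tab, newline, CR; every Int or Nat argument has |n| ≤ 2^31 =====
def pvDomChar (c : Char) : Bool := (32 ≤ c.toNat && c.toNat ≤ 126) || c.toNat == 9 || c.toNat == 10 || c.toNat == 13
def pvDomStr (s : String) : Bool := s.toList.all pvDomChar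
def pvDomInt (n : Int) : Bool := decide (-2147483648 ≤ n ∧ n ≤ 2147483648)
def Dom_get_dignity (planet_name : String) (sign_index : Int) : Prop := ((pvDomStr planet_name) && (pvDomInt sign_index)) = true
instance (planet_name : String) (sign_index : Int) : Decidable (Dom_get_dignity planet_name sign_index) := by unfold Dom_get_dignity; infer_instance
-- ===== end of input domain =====

-- B replaces the nested dignity table and its per-call scan by one flat
-- hand-inverted (planet, sign) -> dignity map: a single lookup, no loop (simpler).

-- ===== PORT A =====
def DIGNITY_TABLE : PySem.Dict String (PySem.Dict String (List Int)) :=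
  PySem.Dict.ofList [
    ("Sun",     PySem.Dict.ofList [("Domicile", [4]),      ("Exaltation", [0]),  ("Detriment", [10]),    ("Fall", [6])]),
    ("Moon",    PySem.Dict.ofList [("Domicile", [3]),      ("Exaltation", [1]),  ("Detriment", [9]),     ("Fall", [7])]),
    ("Mercury", PySem.Dict.ofList [("Domicile", [2, 5]),   ("Exaltation", [5]),  ("Detriment", [8, 11]), ("Fall", [11])]),
    ("Venus",   PySem.Dict.ofList [("Domicile", [1, 6]),   ("Exaltation", [11]), ("Detriment", [7, 0]),  ("Fall", [5])]),
    ("Mars",    PySem.Dict.ofList [("Domicile", [0, 7]),   ("Exaltation", [9]),  ("Detriment", [6, 1]),  ("Fall", [3])]),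
    ("Jupiter", PySem.Dict.ofList [("Domicile", [8, 11]),  ("Exaltation", [3]),  ("Detriment", [2, 5]),  ("Fall", [9])]),
    ("Saturn",  PySem.Dict.ofList [("Domicile", [9, 10]),  ("Exaltation", [6]),  ("Detriment", [3, 4]),  ("Fall", [0])]),
    ("Uranus",  PySem.Dict.ofList [("Domicile", [10]),     ("Exaltation", [7]),  ("Detriment", [4]),     ("Fall", [1])]),
    ("Neptune", PySem.Dict.ofList [("Domicile", [11]),     ("Exaltation", [3]),  ("Detriment", [5]),     ("Fall", [9])]),
    ("Pluto",   PySem.Dict.ofList [("Domicile", [7]),      ("Exaltation", [0]),  ("Detriment", [1]),     ("Fall", [6])])]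

-- the for-loop over table.items() with an early return on the first match
def findDignity (sign_index : Int) : List (String × List Int) → Option String
  | [] => none
  | (dignity, signs) :: rest =>
      if signs.contains sign_index then some dignity else findDignity sign_index rest

def get_dignity (planet_name : String) (sign_index : Int) : Option String :=
  match DIGNITY_TABLE.get? planet_name with
  | none => none
  | some table =>
      -- 'if not table: return None' — a dict is falsy iff empty
      if table.items.isEmpty then none
      else findDignity sign_index table.items

-- ===== PORT B =====
-- flat literal dict (planet, sign) -> dignity; distinct keys, so dict.get = first-match lookup
def INVERTED : List ((String × Int) × String) := [
  (("Sun", 4), "Domicile"), (("Sun", 0), "Exaltation"), (("Sun", 10), "Detriment"), (("Sun", 6), "Fall"),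
  (("Moon", 3), "Domicile"), (("Moon", 1), "Exaltation"), (("Moon", 9), "Detriment"), (("Moon", 7), "Fall"),
  (("Mercury", 2), "Domicile"), (("Mercury", 5), "Domicile"), (("Mercury", 8), "Detriment"), (("Mercury", 11), "Detriment"),
  (("Venus", 1), "Domicile"), (("Venus", 6), "Domicile"), (("Venus", 11), "Exaltation"), (("Venus", 7), "Detriment"), (("Venus", 0), "Detriment"), (("Venus", 5), "Fall"),
  (("Mars", 0), "Domicile"), (("Mars", 7), "Domicile"), (("Mars", 9), "Exaltation"), (("Mars", 6), "Detriment"), (("Mars", 1), "Detriment"), (("Mars", 3), "Fall"),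
  (("Jupiter", 8), "Domicile"), (("Jupiter", 11), "Domicile"), (("Jupiter", 3), "Exaltation"), (("Jupiter", 2), "Detriment"), (("Jupiter", 5), "Detriment"), (("Jupiter", 9), "Fall"),
  (("Saturn", 9), "Domicile"), (("Saturn", 10), "Domicile"), (("Saturn", 6), "Exaltation"), (("Saturn", 3), "Detriment"), (("Saturn", 4), "Detriment"), (("Saturn", 0), "Fall"),
  (("Uranus", 10), "Domicile"), (("Uranus", 7), "Exaltation"), (("Uranus", 4), "Detriment"), (("Uranus", 1), "Fall"),
  (("Neptune", 11), "Domicile"), (("Neptune", 3), "Exaltation"), (("Neptune", 5), "Detriment"), (("Neptune", 9), "Fall"),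
  (("Pluto", 7), "Domicile"), (("Pluto", 0), "Exaltation"), (("Pluto", 1), "Detriment"), (("Pluto", 6), "Fall")]

def get_dignity_alt (planet_name : String) (sign_index : Int) : Option String :=
  INVERTED.lookup (planet_name, sign_index)

-- ===== PRECONDITION & SPEC =====
def Spec_get_dignity (planet_name : String) (sign_index : Int) (out : Option String) : Prop := out = get_dignity_alt planet_name sign_index
instance (planet_name : String) (sign_index : Int) (out : Option String) : Decidable (Spec_get_dignity planet_name sign_index out) := by unfold Spec_get_dignity; infer_instance

-- ===== CLAIM =====
def Claim_equal_get_dignity : Prop := ∀ (planet_name : String) (sign_index : Int), Dom_get_dignity planet_name sign_index → Spec_get_dignity planet_name sign_index (get_dignity planet_name sign_index)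

-- ===== LEMMAS AND PROOFS =====

-- DIGNITY_TABLE normalised to Dict.mk literals (proof helper)
set_option maxRecDepth 4000 in
theorem tbl_eq : DIGNITY_TABLE = PySem.Dict.mk [
    ("Sun",     PySem.Dict.mk [("Domicile", [4]),      ("Exaltation", [0]),  ("Detriment", [10]),    ("Fall", [6])]),
    ("Moon",    PySem.Dict.mk [("Domicile", [3]),      ("Exaltation", [1]),  ("Detriment", [9]),     ("Fall", [7])]),
    ("Mercury", PySem.Dict.mk [("Domicile", [2, 5]),   ("Exaltation", [5]),  ("Detriment", [8, 11]), ("Fall", [11])]),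
    ("Venus",   PySem.Dict.mk [("Domicile", [1, 6]),   ("Exaltation", [11]), ("Detriment", [7, 0]),  ("Fall", [5])]),
    ("Mars",    PySem.Dict.mk [("Domicile", [0, 7]),   ("Exaltation", [9]),  ("Detriment", [6, 1]),  ("Fall", [3])]),
    ("Jupiter", PySem.Dict.mk [("Domicile", [8, 11]),  ("Exaltation", [3]),  ("Detriment", [2, 5]),  ("Fall", [9])]),
    ("Saturn",  PySem.Dict.mk [("Domicile", [9, 10]),  ("Exaltation", [6]),  ("Detriment", [3, 4]),  ("Fall", [0])]),
    ("Uranus",  PySem.Dict.mk [("Domicile", [10]),     ("Exaltation", [7]),  ("Detriment", [4]),     ("Fall", [1])]),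
    ("Neptune", PySem.Dict.mk [("Domicile", [11]),     ("Exaltation", [3]),  ("Detriment", [5]),     ("Fall", [9])]),
    ("Pluto",   PySem.Dict.mk [("Domicile", [7]),      ("Exaltation", [0]),  ("Detriment", [1]),     ("Fall", [6])])] := by decide

theorem findDignity_cons (s : Int) (d : String) (sg : List Int) (rest : List (String × List Int)) :
    findDignity s ((d, sg) :: rest) = if sg.contains s then some d else findDignity s rest := rfl

theorem findDignity_nil (s : Int) : findDignity s [] = none := rfl

-- ===== VERDICT =====
theorem lookup_cons {α β : Type} [BEq α] (a k : α) (v : β) (l : List (α × β)) :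
    List.lookup a ((k, v) :: l) = if a == k then some v else List.lookup a l := by
  cases h : a == k <;> simp [List.lookup, h]

set_option maxRecDepth 20000 in
set_option maxHeartbeats 2000000 in
theorem get_dignity_spec : Claim_equal_get_dignity := by
  intro p s _
  unfold Spec_get_dignity get_dignity get_dignity_alt INVERTED
  rw [tbl_eq]
  by_cases h0 : p = "Sun"
  · subst h0
    simp only [PySem.Dict.get?_mk_cons, beq_iff_eq, String.reduceEq, if_false, if_true,
      PySem.Dict.items, List.isEmpty_cons, Bool.false_eq_true,
      findDignity_cons, findDignity_nil, List.contains_cons, List.contains_nil,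
      Bool.or_eq_true, Bool.or_false, decide_eq_true_eq,
      lookup_cons, List.lookup_nil, Prod.mk.injEq, false_and, true_and]
    all_goals (split_ifs <;> first | rfl | omega)
  by_cases h1 : p = "Moon"
  · subst h1
    simp only [PySem.Dict.get?_mk_cons, beq_iff_eq, String.reduceEq, if_false, if_true,
      PySem.Dict.items, List.isEmpty_cons, Bool.false_eq_true,
      findDignity_cons, findDignity_nil, List.contains_cons, List.contains_nil,
      Bool.or_eq_true, Bool.or_false, decide_eq_true_eq,
      lookup_cons, List.lookup_nil, Prod.mk.injEq, false_and, true_and]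
    all_goals (split_ifs <;> first | rfl | omega)
  by_cases h2 : p = "Mercury"
  · subst h2
    simp only [PySem.Dict.get?_mk_cons, beq_iff_eq, String.reduceEq, if_false, if_true,
      PySem.Dict.items, List.isEmpty_cons, Bool.false_eq_true,
      findDignity_cons, findDignity_nil, List.contains_cons, List.contains_nil,
      Bool.or_eq_true, Bool.or_false, decide_eq_true_eq,
      lookup_cons, List.lookup_nil, Prod.mk.injEq, false_and, true_and]
    all_goals (split_ifs <;> first | rfl | omega)
  by_cases h3 : p = "Venus"
  · subst h3
    simp only [PySem.Dict.get?_mk_cons, beq_iff_eq, String.reduceEq, if_false, if_true,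
      PySem.Dict.items, List.isEmpty_cons, Bool.false_eq_true,
      findDignity_cons, findDignity_nil, List.contains_cons, List.contains_nil,
      Bool.or_eq_true, Bool.or_false, decide_eq_true_eq,
      lookup_cons, List.lookup_nil, Prod.mk.injEq, false_and, true_and]
    all_goals (split_ifs <;> first | rfl | omega)
  by_cases h4 : p = "Mars"
  · subst h4
    simp only [PySem.Dict.get?_mk_cons, beq_iff_eq, String.reduceEq, if_false, if_true,
      PySem.Dict.items, List.isEmpty_cons, Bool.false_eq_true,
      findDignity_cons, findDignity_nil, List.contains_cons, List.contains_nil,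
      Bool.or_eq_true, Bool.or_false, decide_eq_true_eq,
      lookup_cons, List.lookup_nil, Prod.mk.injEq, false_and, true_and]
    all_goals (split_ifs <;> first | rfl | omega)
  by_cases h5 : p = "Jupiter"
  · subst h5
    simp only [PySem.Dict.get?_mk_cons, beq_iff_eq, String.reduceEq, if_false, if_true,
      PySem.Dict.items, List.isEmpty_cons, Bool.false_eq_true,
      findDignity_cons, findDignity_nil, List.contains_cons, List.contains_nil,
      Bool.or_eq_true, Bool.or_false, decide_eq_true_eq,
      lookup_cons, List.lookup_nil, Prod.mk.injEq, false_and, true_and]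
    all_goals (split_ifs <;> first | rfl | omega)
  by_cases h6 : p = "Saturn"
  · subst h6
    simp only [PySem.Dict.get?_mk_cons, beq_iff_eq, String.reduceEq, if_false, if_true,
      PySem.Dict.items, List.isEmpty_cons, Bool.false_eq_true,
      findDignity_cons, findDignity_nil, List.contains_cons, List.contains_nil,
      Bool.or_eq_true, Bool.or_false, decide_eq_true_eq,
      lookup_cons, List.lookup_nil, Prod.mk.injEq, false_and, true_and]
    all_goals (split_ifs <;> first | rfl | omega)
  by_cases h7 : p = "Uranus"
  · subst h7
    simp only [PySem.Dict.get?_mk_cons, beq_iff_eq, String.reduceEq, if_false, if_true,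
      PySem.Dict.items, List.isEmpty_cons, Bool.false_eq_true,
      findDignity_cons, findDignity_nil, List.contains_cons, List.contains_nil,
      Bool.or_eq_true, Bool.or_false, decide_eq_true_eq,
      lookup_cons, List.lookup_nil, Prod.mk.injEq, false_and, true_and]
    all_goals (split_ifs <;> first | rfl | omega)
  by_cases h8 : p = "Neptune"
  · subst h8
    simp only [PySem.Dict.get?_mk_cons, beq_iff_eq, String.reduceEq, if_false, if_true,
      PySem.Dict.items, List.isEmpty_cons, Bool.false_eq_true,
      findDignity_cons, findDignity_nil, List.contains_cons, List.contains_nil,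
      Bool.or_eq_true, Bool.or_false, decide_eq_true_eq,
      lookup_cons, List.lookup_nil, Prod.mk.injEq, false_and, true_and]
    all_goals (split_ifs <;> first | rfl | omega)
  by_cases h9 : p = "Pluto"
  · subst h9
    simp only [PySem.Dict.get?_mk_cons, beq_iff_eq, String.reduceEq, if_false, if_true,
      PySem.Dict.items, List.isEmpty_cons, Bool.false_eq_true,
      findDignity_cons, findDignity_nil, List.contains_cons, List.contains_nil,
      Bool.or_eq_true, Bool.or_false, decide_eq_true_eq,
      lookup_cons, List.lookup_nil, Prod.mk.injEq, false_and, true_and]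
    all_goals (split_ifs <;> first | rfl | omega)
  · simp [PySem.Dict.get?, lookup_cons, List.lookup_nil, Prod.mk.injEq, PySem.Dict.get?_mk_cons, h0, h1, h2, h3, h4, h5, h6, h7, h8, h9, Ne.symm h0, Ne.symm h1, Ne.symm h2, Ne.symm h3, Ne.symm h4, Ne.symm h5, Ne.symm h6, Ne.symm h7, Ne.symm h8, Ne.symm h9]
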